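-- pv_equiv track=rewrite | github.com/mnot/http_sfv | shhh/string.py | ser_string
-- ===== SOURCE A (Python) =====
-- DQUOTE = '"'
--
-- BACKSLASH = "\\"
--
-- def ser_string(inval: str) -> str:
--     if not all(31 < ord(char) < 127 for char in inval):
--         raise ValueError("String contains disallowed characters.")
--     output = ""
--     output += DQUOTE
--     for char in inval:
--         if char in BACKSLASH + DQUOTE:
--             output += BACKSLASH
--         output += char
--     output += DQUOTE
--     return output
-- ===== SOURCE B (Python) =====
-- DQUOTE = '"'
--
-- BACKSLASH = "\\"
--
-- def ser_string(inval: str) -> str: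
--     if not all(31 < ord(char) < 127 for char in inval):
--         raise ValueError("String contains disallowed characters.")
--     return DQUOTE + inval.replace(BACKSLASH, BACKSLASH + BACKSLASH).replace(DQUOTE, BACKSLASH + DQUOTE) + DQUOTE
-- ===== Notes on version B (the rewrite author's own statement) =====
-- stated objective: idiomatic
-- what changed: Replaces A's per-character accumulator loop with two whole-string str.replace passes (backslash first, then quote) wrapped in quotes.
import Mathlib
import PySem

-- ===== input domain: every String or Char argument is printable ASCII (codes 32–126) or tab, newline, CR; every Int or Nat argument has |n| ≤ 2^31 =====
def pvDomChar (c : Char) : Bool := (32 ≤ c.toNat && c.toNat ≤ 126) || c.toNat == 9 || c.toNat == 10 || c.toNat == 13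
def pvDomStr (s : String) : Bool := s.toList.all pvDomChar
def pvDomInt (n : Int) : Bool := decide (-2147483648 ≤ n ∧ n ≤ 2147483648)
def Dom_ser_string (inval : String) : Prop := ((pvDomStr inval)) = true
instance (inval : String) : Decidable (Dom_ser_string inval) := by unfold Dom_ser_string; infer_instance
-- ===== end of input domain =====

-- B replaces A's per-character accumulator loop with two whole-string replace passes
-- (backslash first, then quote) wrapped in quotes; objective: idiomatic. Same validation guard.

-- ===== PORT A =====
-- literal port of A: validation is the `raise`, excluded by Pre_; then the fused
-- per-character loop with a string accumulator (`char in BACKSLASH + DQUOTE` via Str.isIn).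
def ser_string (inval : String) : String :=
  let output := ""
  let output := output ++ "\""
  let output := inval.toList.foldl
    (fun acc char =>
      (if PySem.Str.isIn (String.ofList [char]) ("\\" ++ "\"") then acc ++ "\\" else acc)
        ++ String.ofList [char]) output
  output ++ "\""

-- ===== PORT B =====
-- literal port of Source B: two str.replace passes, then wrap in DQUOTEs.
def ser_string_alt (inval : String) : String :=
  "\"" ++ PySem.Str.replace (PySem.Str.replace inval "\\" ("\\" ++ "\\")) "\"" ("\\" ++ "\"") ++ "\""

-- ===== PRECONDITION & SPEC =====
-- Pre_ excludes exactly the inputs on which the Python A raises ValueError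
-- (a character outside printable ASCII 32..126); B raises there too.
def Pre_ser_string (inval : String) : Prop :=
  (inval.toList.all (fun c => 31 < c.toNat && c.toNat < 127)) = true
instance (inval : String) : Decidable (Pre_ser_string inval) := by unfold Pre_ser_string; infer_instance
def pvWitness_ser_string : String := "hi \"quoted\" \\path"
def Spec_ser_string (inval : String) (out : String) : Prop := out = ser_string_alt inval
instance (inval : String) (out : String) : Decidable (Spec_ser_string inval out) := by unfold Spec_ser_string; infer_instance

-- ===== CLAIM (what is proved, stated in full; the proofs are below) =====
def Claim_equal_ser_string : Prop := ∀ (inval : String), Dom_ser_string inval → Pre_ser_string inval → Spec_ser_string inval (ser_string inval)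

-- ===== LEMMAS AND PROOFS =====

-- A's per-char escape, as a list-producing function.
def escA (c : Char) : List Char := if c = '\\' ∨ c = '"' then ['\\', c] else [c]

-- replace with a single-char pattern is a flatMap (fuel-indexed go, fuel ≥ length).
theorem go_single (x : Char) (new : List Char) :
    ∀ (fuel : Nat) (l acc : List Char), l.length ≤ fuel →
      PySem.Chars.replace.go [x] new fuel l acc
        = acc.reverse ++ l.flatMap (fun c => if c = x then new else [c]) := by
  intro fuel
  induction fuel with
  | zero =>
    intro l acc h
    have : l = [] := List.eq_nil_of_length_eq_zero (Nat.le_zero.mp h)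
    subst this
    simp [PySem.Chars.replace.go]
  | succ n ih =>
    intro l acc h
    cases l with
    | nil => simp [PySem.Chars.replace.go]
    | cons c t =>
      simp only [PySem.Chars.replace.go]
      by_cases hc : c = x
      · subst hc
        have hpre : List.isPrefixOf [c] (c :: t) = true := by
          simp [List.isPrefixOf]
        rw [hpre]
        simp only [List.length, List.drop_succ_cons, List.drop_zero]
        rw [ih t (new.reverse ++ acc) (by simpa using Nat.le_of_succ_le_succ h)]
        simp
      · have hpre : List.isPrefixOf [x] (c :: t) = false := by
          simp [List.isPrefixOf]
          intro hxc; exact hc hxc.symm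
        rw [hpre]
        simp only [Bool.false_eq_true, if_false]
        rw [ih t (c :: acc) (by simpa using Nat.le_of_succ_le_succ h)]
        simp [hc]

theorem replace_single (s : List Char) (x : Char) (new : List Char) :
    PySem.Chars.replace s [x] new = s.flatMap (fun c => if c = x then new else [c]) := by
  rw [PySem.Chars.replace]
  simp only [List.isEmpty_cons, Bool.false_eq_true, if_false]
  exact go_single x new s.length s [] (le_refl _)

-- the membership test A performs per character
theorem isIn_single (c : Char) :
    PySem.Str.isIn (String.ofList [c]) ("\\" ++ "\"") = (c = '\\' ∨ c = '"' : Bool) := by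
  by_cases h1 : c = '\\'
  · subst h1; decide
  · by_cases h2 : c = '"'
    · subst h2; decide
    · have : PySem.Str.isIn (String.ofList [c]) ("\\" ++ "\"") = false := by
        have hb : PySem.Str.isIn (String.ofList [c]) ("\\" ++ "\"")
            = PySem.Chars.isIn [c] ['\\', '"'] := by simp [PySem.Str.isIn]
        rw [hb, PySem.Chars.isIn_eq_false_iff]
        intro hinf
        have : c ∈ ['\\', '"'] := hinf.subset (List.mem_singleton_self c)
        simp at this
        rcases this with h | h
        · exact h1 h
        · exact h2 h
      rw [this]
      simp [h1, h2]

-- A's loop, characterised on toList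
theorem foldl_escA (l : List Char) (acc : String) :
    (l.foldl
      (fun acc char =>
        (if PySem.Str.isIn (String.ofList [char]) ("\\" ++ "\"") then acc ++ "\\" else acc)
          ++ String.ofList [char]) acc).toList = acc.toList ++ l.flatMap escA := by
  induction l generalizing acc with
  | nil => simp
  | cons c t ih =>
    simp only [List.foldl_cons, List.flatMap_cons]
    rw [ih]
    rw [isIn_single c]
    by_cases h : c = '\\' ∨ c = '"'
    · simp [escA, h]
    · simp [escA, h]

-- the two single-char replaces compose to A's escape
theorem flatMap_compose (l : List Char) :
    (l.flatMap (fun c => if c = '\\' then ['\\', '\\'] else [c])).flatMap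
        (fun c => if c = '"' then ['\\', '"'] else [c])
      = l.flatMap escA := by
  rw [List.flatMap_assoc]
  apply List.flatMap_congr
  intro c _
  by_cases h1 : c = '\\'
  · subst h1; simp [escA]
  · by_cases h2 : c = '"'
    · subst h2; simp [escA]
    · simp [escA, h1, h2]

-- ===== VERDICT (by name: the statement is the Claim_ definition above) =====
theorem ser_string_spec : Claim_equal_ser_string := by
  intro inval _ _
  unfold Spec_ser_string ser_string ser_string_alt
  apply String.toList_inj.mp
  simp only [String.toList_append, PySem.Str.toList_replace]
  rw [foldl_escA]
  rw [show ("\"" : String).toList = ['"'] from rfl,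
      show ("\\" : String).toList = ['\\'] from rfl]
  rw [replace_single, replace_single]
  simp only [List.cons_append, List.nil_append]
  rw [flatMap_compose]
  simp
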